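-- pv_equiv track=rewrite | github.com/LYXCQX/auto_publish_videos | util/sub_title_util.py | get_non_subtitle_areas
-- ===== SOURCE A (Python) =====
-- def get_non_subtitle_areas(subtitle_areas, frame_height):
--     """获取非字幕区域"""
--     non_subtitle_areas = []
--     last_y = 0
--     for (y1, y2) in subtitle_areas:
--         if last_y < y1:
--             non_subtitle_areas.append((last_y, y1))
--         last_y = y2
--     if last_y < frame_height:
--         non_subtitle_areas.append((last_y, frame_height))
--     return non_subtitle_areas
-- ===== SOURCE B (Python) =====
-- def get_non_subtitle_areas(subtitle_areas, frame_height):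
--     """获取非字幕区域"""
--     pts = [0] + [c for (y1, y2) in subtitle_areas for c in (y1, y2)] + [frame_height]
--     return [(a, b) for (a, b) in zip(pts[0::2], pts[1::2]) if a < b]
-- ===== Notes on version B (the rewrite author's own statement) =====
-- stated objective: alternative
-- what changed: Replaces the stateful last_y loop by a flat boundary list [0]+all endpoints+[frame_height], pairing consecutive boundaries via zip of even/odd slices and filtering strictly increasing pairs.
import Mathlib
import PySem

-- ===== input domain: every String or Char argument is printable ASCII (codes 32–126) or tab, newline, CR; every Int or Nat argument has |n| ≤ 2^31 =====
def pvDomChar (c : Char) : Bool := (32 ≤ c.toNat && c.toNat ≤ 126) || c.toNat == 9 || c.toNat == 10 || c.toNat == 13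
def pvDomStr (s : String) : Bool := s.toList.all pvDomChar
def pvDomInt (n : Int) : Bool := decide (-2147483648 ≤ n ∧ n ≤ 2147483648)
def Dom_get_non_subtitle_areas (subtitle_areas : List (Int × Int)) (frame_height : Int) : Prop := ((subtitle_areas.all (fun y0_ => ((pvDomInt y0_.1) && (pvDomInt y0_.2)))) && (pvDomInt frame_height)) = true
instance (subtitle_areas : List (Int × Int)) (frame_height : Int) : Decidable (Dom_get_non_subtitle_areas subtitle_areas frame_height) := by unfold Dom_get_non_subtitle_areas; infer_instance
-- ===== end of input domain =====

-- ===== PORT A =====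
-- B rebuilds the result from a flat boundary list paired by even/odd slices instead of A's
-- stateful last_y loop (objective: alternative decomposition; return values proved equal).
def get_non_subtitle_areas (subtitle_areas : List (Int × Int)) (frame_height : Int) : List (Int × Int) :=
  let s := subtitle_areas.foldl
    (fun (st : List (Int × Int) × Int) (yy : Int × Int) =>
      let acc := if st.2 < yy.1 then st.1 ++ [(st.2, yy.1)] else st.1
      (acc, yy.2))
    ([], 0)
  if s.2 < frame_height then s.1 ++ [(s.2, frame_height)] else s.1

-- ===== PORT B =====
-- hand port of the step-2 slice xs[0::2] for a List Int (exact: takes indices 0,2,4,…)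
def pvStep2 : List Int → List Int
  | [] => []
  | [a] => [a]
  | a :: _ :: t => a :: pvStep2 t

def get_non_subtitle_areas_alt (subtitle_areas : List (Int × Int)) (frame_height : Int) : List (Int × Int) :=
  let pts : List Int := 0 :: subtitle_areas.flatMap (fun yy => [yy.1, yy.2]) ++ [frame_height]
  -- pts[0::2] = pvStep2 pts ; pts[1::2] = pvStep2 pts.tail
  ((pvStep2 pts).zip (pvStep2 pts.tail)).filter (fun p => p.1 < p.2)

-- ===== PRECONDITION & SPEC =====
def Spec_get_non_subtitle_areas (subtitle_areas : List (Int × Int)) (frame_height : Int) (out : List (Int × Int)) : Prop := out = get_non_subtitle_areas_alt subtitle_areas frame_height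
instance (subtitle_areas : List (Int × Int)) (frame_height : Int) (out : List (Int × Int)) : Decidable (Spec_get_non_subtitle_areas subtitle_areas frame_height out) := by unfold Spec_get_non_subtitle_areas; infer_instance

-- ===== CLAIM =====
def Claim_equal_get_non_subtitle_areas : Prop := ∀ (subtitle_areas : List (Int × Int)) (frame_height : Int), Dom_get_non_subtitle_areas subtitle_areas frame_height → Spec_get_non_subtitle_areas subtitle_areas frame_height (get_non_subtitle_areas subtitle_areas frame_height)

-- ===== LEMMAS AND PROOFS =====
-- Invariant: from any state (acc, last), A's remaining loop + final append equals
-- acc ++ the filtered zip of B's boundary pairing starting at `last`.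
theorem pv_loop_eq (areas : List (Int × Int)) (h last : Int) (acc : List (Int × Int)) :
    (let s := areas.foldl
        (fun (st : List (Int × Int) × Int) (yy : Int × Int) =>
          let acc := if st.2 < yy.1 then st.1 ++ [(st.2, yy.1)] else st.1
          (acc, yy.2)) (acc, last)
     if s.2 < h then s.1 ++ [(s.2, h)] else s.1)
    = acc ++ (((pvStep2 (last :: areas.flatMap (fun yy => [yy.1, yy.2]) ++ [h])).zip
        (pvStep2 ((last :: areas.flatMap (fun yy => [yy.1, yy.2]) ++ [h]).tail))).filter
        (fun p => p.1 < p.2)) := by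
  induction areas generalizing last acc with
  | nil =>
    simp [pvStep2]
    split_ifs with hw <;> simp [hw]
  | cons yy rest ih =>
    obtain ⟨y1, y2⟩ := yy
    simp only [List.foldl_cons, List.flatMap_cons]
    rw [ih]
    by_cases hlt : last < y1 <;>
      simp [pvStep2, hlt, List.append_assoc]

-- ===== VERDICT =====
theorem get_non_subtitle_areas_spec : Claim_equal_get_non_subtitle_areas := by
  intro sa h _
  show _ = _
  unfold get_non_subtitle_areas get_non_subtitle_areas_alt
  simpa using pv_loop_eq sa h 0 []
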